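-- pv_equiv track=rewrite | github.com/modularizer/plat | python/plat/cli_main.py | first_positional
-- ===== SOURCE A (Python) =====
-- def first_positional(args: list[str], value_flags: set[str]) -> str | None:
--     skip_next = False
--     for arg in args:
--         if skip_next:
--             skip_next = False
--             continue
--         if arg in value_flags:
--             skip_next = True
--             continue
--         if arg.startswith("--"):
--             continue
--         return arg
--     return None
-- ===== SOURCE B (Python) =====
-- def first_positional(args: list[str], value_flags: set[str]) -> str | None:
--     # Stage 1: precompute the set of indices consumed as values of value flags.
--     consumed = set()
--     for i, a in enumerate(args):
--         if i not in consumed and a in value_flags: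
--             consumed.add(i + 1)
--     # Stage 2: independent scan using only the precomputed set.
--     for i, a in enumerate(args):
--         if i not in consumed and a not in value_flags and not a.startswith("--"):
--             return a
--     return None
-- ===== Notes on version B (the rewrite author's own statement) =====
-- stated objective: alternative
-- what changed: Replaces A's single stateful scan with a skip_next boolean by two staged passes: pass 1 precomputes the set of indices consumed as values of value flags, pass 2 scans independently with that fixed set and returns the first index that is neither consumed, a value flag, nor '--'-prefixed.
import Mathlib
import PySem

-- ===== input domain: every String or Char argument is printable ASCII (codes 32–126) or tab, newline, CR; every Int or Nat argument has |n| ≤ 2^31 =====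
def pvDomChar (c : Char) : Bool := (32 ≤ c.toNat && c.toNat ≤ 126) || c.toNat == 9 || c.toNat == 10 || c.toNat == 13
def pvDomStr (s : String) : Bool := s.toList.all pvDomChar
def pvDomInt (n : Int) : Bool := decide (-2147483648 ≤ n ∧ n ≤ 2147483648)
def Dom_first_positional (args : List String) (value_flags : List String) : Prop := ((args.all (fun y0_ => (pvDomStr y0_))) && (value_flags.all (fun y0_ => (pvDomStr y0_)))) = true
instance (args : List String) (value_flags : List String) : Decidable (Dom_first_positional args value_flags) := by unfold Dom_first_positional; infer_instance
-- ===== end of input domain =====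

-- B replaces A's single stateful scan (skip_next boolean) by two staged passes: stage 1
-- precomputes the set of indices consumed as values of value flags, stage 2 scans with
-- that fixed set and no mutable skip state (alternative decomposition, same cost).

-- ===== PORT A =====
-- A's for-loop with the skip_next boolean, transcribed as structural recursion on args.
def fpLoopA (value_flags : List String) (skip_next : Bool) : List String → Option String
  | [] => none
  | arg :: rest =>
    if skip_next then fpLoopA value_flags false rest
    else if PySem.Set.contains value_flags arg then fpLoopA value_flags true rest
    else if PySem.Str.startswith arg "--" then fpLoopA value_flags false rest
    else some arg

def first_positional (args : List String) (value_flags : List String) : Option String :=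
  fpLoopA value_flags false args

-- ===== PORT B =====
-- Stage 1 of Source B: 'for i, a in enumerate(args): if i not in consumed and a in value_flags: consumed.add(i+1)'
def fpConsumed (value_flags : List String) : Nat → PySem.Set Nat → List String → PySem.Set Nat
  | _, c, [] => c
  | i, c, a :: rest =>
    if ¬ PySem.Set.contains c i ∧ PySem.Set.contains value_flags a then
      fpConsumed value_flags (i + 1) (PySem.Set.add c (i + 1)) rest
    else fpConsumed value_flags (i + 1) c rest

-- Stage 2 of Source B: 'for i, a in enumerate(args): if i not in consumed and …: return a'
def fpFind (value_flags : List String) (consumed : PySem.Set Nat) : Nat → List String → Option String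
  | _, [] => none
  | i, a :: rest =>
    if ¬ PySem.Set.contains consumed i ∧ ¬ PySem.Set.contains value_flags a
        ∧ ¬ PySem.Str.startswith a "--" then some a
    else fpFind value_flags consumed (i + 1) rest

def first_positional_alt (args : List String) (value_flags : List String) : Option String :=
  let consumed := fpConsumed value_flags 0 PySem.Set.empty args
  fpFind value_flags consumed 0 args

-- ===== PRECONDITION & SPEC =====
def Spec_first_positional (args : List String) (value_flags : List String) (out : Option String) : Prop := out = first_positional_alt args value_flags
instance (args : List String) (value_flags : List String) (out : Option String) : Decidable (Spec_first_positional args value_flags out) := by unfold Spec_first_positional; infer_instance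

-- ===== CLAIM (what is proved, stated in full; the proofs are below) =====
def Claim_equal_first_positional : Prop := ∀ (args : List String) (value_flags : List String), Dom_first_positional args value_flags → Spec_first_positional args value_flags (first_positional args value_flags)

-- ===== LEMMAS AND PROOFS =====

-- Stage 1 only ever adds indices strictly above the current position, so membership of
-- any j ≤ i in the final set is already decided by the accumulator when the scan is at i.
theorem fpConsumed_mem_low (vf : List String) (l : List String) (i j : Nat)
    (c : PySem.Set Nat) (hj : j ≤ i) :
    j ∈ fpConsumed vf i c l ↔ j ∈ c := by
  induction l generalizing i c with
  | nil => exact Iff.rfl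
  | cons a rest ih =>
    rw [fpConsumed]
    split_ifs with h
    · rw [ih (i + 1) _ (by omega), PySem.Set.mem_add]
      constructor
      · rintro (hm | he)
        · exact hm
        · omega
      · exact Or.inl
    · exact ih (i + 1) c (by omega)

-- Core invariant: scanning the suffix at index i with the FULL consumed set equals A's
-- loop whose skip_next flag records whether i is in the accumulator so far.
theorem fpFind_eq_loopA (vf : List String) (l : List String) (i : Nat)
    (c : PySem.Set Nat) (hc : ∀ j ∈ c, j ≤ i) :
    fpFind vf (fpConsumed vf i c l) i l = fpLoopA vf (PySem.Set.contains c i) l := by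
  induction l generalizing i c with
  | nil => rfl
  | cons a rest ih =>
    have hmem : i ∈ fpConsumed vf i c (a :: rest) ↔ i ∈ c := by
      rw [fpConsumed]
      split_ifs with h
      · rw [fpConsumed_mem_low vf rest (i+1) i _ (by omega), PySem.Set.mem_add]
        constructor
        · rintro (hm | he)
          · exact hm
          · omega
        · exact Or.inl
      · exact fpConsumed_mem_low vf rest (i+1) i c (by omega)
    have hsucc : i + 1 ∉ c := fun hmem => by have := hc _ hmem; omega
    by_cases hskip : i ∈ c
    · -- index i is consumed: both sides just move on
      have hskipb : PySem.Set.contains c i = true := List.contains_iff_mem.mpr hskip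
      have hC1 : PySem.Set.contains c (i+1) = false := by
        cases hh : PySem.Set.contains c (i + 1)
        · rfl
        · exact absurd (List.contains_iff_mem.mp hh) hsucc
      have hstep : fpConsumed vf i c (a :: rest) = fpConsumed vf (i+1) c rest := by
        rw [fpConsumed, if_neg (fun hcond => hcond.1 hskipb)]
      rw [fpFind, if_neg (fun hcond => hcond.1 (List.contains_iff_mem.mpr (hmem.mpr hskip))),
        hskipb, fpLoopA, if_pos rfl, hstep,
        ih (i+1) c (fun j hj => by have := hc j hj; omega), hC1]
    · have hskipb : PySem.Set.contains c i = false := by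
        cases hh : PySem.Set.contains c i
        · rfl
        · exact absurd (List.contains_iff_mem.mp hh) hskip
      have hC1 : PySem.Set.contains c (i+1) = false := by
        cases hh : PySem.Set.contains c (i + 1)
        · rfl
        · exact absurd (List.contains_iff_mem.mp hh) hsucc
      have hmemb : PySem.Set.contains (fpConsumed vf i c (a :: rest)) i = false := by
        cases hh : PySem.Set.contains (fpConsumed vf i c (a :: rest)) i
        · rfl
        · exact absurd (hmem.mp (List.contains_iff_mem.mp hh)) hskip
      by_cases hvf : PySem.Set.contains vf a = true
      · -- a value flag: i+1 becomes consumed, A sets skip_next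
        have hstep : fpConsumed vf i c (a :: rest)
            = fpConsumed vf (i+1) (PySem.Set.add c (i+1)) rest := by
          rw [fpConsumed, if_pos ⟨fun h => hskip (List.contains_iff_mem.mp h), hvf⟩]
        have hAdd : PySem.Set.contains (PySem.Set.add c (i+1)) (i+1) = true :=
          List.contains_iff_mem.mpr ((PySem.Set.mem_add ..).mpr (Or.inr rfl))
        rw [fpFind, if_neg (fun hcond => hcond.2.1 hvf),
          hskipb, fpLoopA, if_neg (by simp), if_pos hvf, hstep,
          ih (i+1) (PySem.Set.add c (i+1)) (fun j hj => by
            rcases (PySem.Set.mem_add ..).mp hj with h1 | h2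
            · have := hc j h1; omega
            · omega), hAdd]
      · have hstep : fpConsumed vf i c (a :: rest) = fpConsumed vf (i+1) c rest := by
          rw [fpConsumed, if_neg (fun hcond => hvf hcond.2)]
        by_cases hsw : PySem.Str.startswith a "--" = true
        · rw [fpFind, if_neg (fun hcond => hcond.2.2 hsw), hskipb, fpLoopA, if_neg (by simp),
            if_neg hvf, if_pos hsw, hstep,
            ih (i+1) c (fun j hj => by have := hc j hj; omega), hC1]
        · rw [fpFind, if_pos ⟨fun h => hskip (hmem.mp (List.contains_iff_mem.mp h)), hvf, hsw⟩, hskipb, fpLoopA, if_neg (by simp),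
            if_neg hvf, if_neg hsw]

-- ===== VERDICT (by name: the statement is the Claim_ definition above) =====
theorem first_positional_spec : Claim_equal_first_positional := by
  intro args vf _
  unfold Spec_first_positional first_positional first_positional_alt
  rw [fpFind_eq_loopA vf args 0 PySem.Set.empty (fun j hj => by cases hj)]
  rfl
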